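-- pv_equiv track=rewrite | github.com/pokerdio/generic | euler/euler-760.py | G2
-- ===== SOURCE A (Python) =====
-- def G2(n):
--     w = 1
--     empty_max = 2 ** (n - 1)
--
--     N = 2 ** n
--
--     s = N * (N + 1) // 2
--
--     ret = 0
--     for i in range(n):
--         ret += (s - (w * w * empty_max * (empty_max + 1) // 2)) * w * 2
--
--         w = w * 2
--         empty_max = empty_max // 2
--     return ret
-- ===== SOURCE B (Python) =====
-- def G2(n):
--     # Closed form: each loop iteration of the original adds
--     # (s - w^2*e*(e+1)//2) * 2w with w = 2^i, e = 2^(n-1-i); summing the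
--     # two geometric series gives the O(1) expression below.
--     if n <= 0:
--         return 0
--     P = 2 ** n
--     s = P * (P + 1) // 2
--     return (2 * s - 4 ** (n - 1)) * (P - 1) - 2 ** (n - 1) * (4 ** n - 1) // 3
-- ===== Notes on version B (the rewrite author's own statement) =====
-- stated objective: faster
-- what changed: Replaced the n-iteration loop over doubling w and halving empty_max by a closed form obtained by summing the two geometric series, so B does O(1) big-integer operations instead of O(n).
import Mathlib
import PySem

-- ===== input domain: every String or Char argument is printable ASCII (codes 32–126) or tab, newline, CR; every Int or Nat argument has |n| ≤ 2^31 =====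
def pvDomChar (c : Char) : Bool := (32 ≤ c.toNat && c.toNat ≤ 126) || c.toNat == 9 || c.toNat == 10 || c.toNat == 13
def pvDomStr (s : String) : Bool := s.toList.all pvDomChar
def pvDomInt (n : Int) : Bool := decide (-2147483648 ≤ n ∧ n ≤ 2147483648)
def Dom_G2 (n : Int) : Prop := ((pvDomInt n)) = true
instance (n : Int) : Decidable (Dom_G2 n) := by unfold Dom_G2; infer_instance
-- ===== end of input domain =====

-- B replaces A's n-iteration loop by the closed form of the two geometric series (O(1) big-int ops).

-- ===== PORT A =====
-- literal transliteration of A's loop; for n ≤ 0 Python's 2**(n-1) is a float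
-- that the (empty) loop never uses, so its representation here is irrelevant to the result
def G2 (n : Int) : Int :=
  let w : Int := 1
  let empty_max : Int := 2 ^ (n - 1).toNat
  let N : Int := 2 ^ n.toNat
  let s : Int := PySem.Int.floordiv (N * (N + 1)) 2
  let fin := (PySem.List.pyRange 0 n 1).foldl
    (fun (acc : Int × Int × Int) (_ : Int) =>
      (acc.1 * 2, PySem.Int.floordiv acc.2.1 2,
        acc.2.2 + (s - PySem.Int.floordiv (acc.1 * acc.1 * acc.2.1 * (acc.2.1 + 1)) 2) * acc.1 * 2))
    (w, empty_max, 0)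
  fin.2.2

-- ===== PORT B =====
def G2_alt (n : Int) : Int :=
  if n ≤ 0 then 0
  else
    let P : Int := 2 ^ n.toNat
    let s : Int := PySem.Int.floordiv (P * (P + 1)) 2
    (2 * s - 4 ^ (n - 1).toNat) * (P - 1) -
      PySem.Int.floordiv (2 ^ (n - 1).toNat * (4 ^ n.toNat - 1)) 3

-- ===== PRECONDITION & SPEC =====
def Spec_G2 (n : Int) (out : Int) : Prop := out = G2_alt n
instance (n : Int) (out : Int) : Decidable (Spec_G2 n out) := by unfold Spec_G2; infer_instance

-- ===== CLAIM (what is proved, stated in full; the proofs are below) =====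
def Claim_equal_G2 : Prop := ∀ (n : Int), Dom_G2 n → Spec_G2 n (G2 n)

-- ===== LEMMAS AND PROOFS =====

-- (4^k - 1)/3 as a recurrence
def g3 : Nat → Int
  | 0 => 0
  | k + 1 => 4 * g3 k + 1

theorem g3_mul_three (k : Nat) : 3 * g3 k = 4 ^ k - 1 := by
  induction k with
  | zero => simp [g3]
  | succ k ih => simp only [g3, pow_succ]; linarith

-- a fold whose step ignores the element is an iterate of the step
theorem foldl_const_iterate {α β : Type} (f : β → β) (l : List α) (b : β) :
    l.foldl (fun acc _ => f acc) b = f^[l.length] b := by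
  induction l generalizing b with
  | nil => rfl
  | cons x xs ih => simp [List.foldl, ih, Function.iterate_succ_apply]

-- the loop step of A, with s fixed
def stepA (s : Int) (acc : Int × Int × Int) : Int × Int × Int :=
  (acc.1 * 2, PySem.Int.floordiv acc.2.1 2,
    acc.2.2 + (s - PySem.Int.floordiv (acc.1 * acc.1 * acc.2.1 * (acc.2.1 + 1)) 2) * acc.1 * 2)

-- closed-form state after k iterations (m = n.toNat, s = 2^(m-1)(2^m+1))
theorem stepA_iterate (m : Nat) (hm : 1 ≤ m) (s : Int) :
    ∀ k, k ≤ m →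
      (stepA s)^[k] ((1 : Int), (2 : Int) ^ (m - 1), (0 : Int)) =
        ((2 : Int) ^ k, ((2 ^ (m - 1) / 2 ^ k : Nat) : Int),
          (2 * s - (2 : Int) ^ (m - 1) * 2 ^ (m - 1)) * (2 ^ k - 1) - 2 ^ (m - 1) * g3 k) := by
  intro k
  induction k with
  | zero => intro _; simp [g3]
  | succ k ih =>
    intro hk
    have hkm : k < m := by omega
    rw [Function.iterate_succ_apply', ih (by omega)]
    have he : ((2 ^ (m - 1) / 2 ^ k : Nat) : Int) = (2 : Int) ^ (m - 1 - k) := by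
      rw [Nat.pow_div (by omega) (by norm_num)]
      push_cast
      ring
    have hdiv2 : PySem.Int.floordiv ((2 ^ (m - 1) / 2 ^ k : Nat) : Int) 2
        = ((2 ^ (m - 1) / 2 ^ (k + 1) : Nat) : Int) := by
      have h := PySem.Int.floordiv_natCast (2 ^ (m - 1) / 2 ^ k) 2
      rw [show ((2 : Nat) : Int) = (2 : Int) by norm_num] at h
      rw [h, Nat.div_div_eq_div_mul, ← pow_succ]
    rw [he] at hdiv2
    obtain ⟨t, ht⟩ : 2 ∣ (2 : Int) ^ (m - 1 - k) * ((2 : Int) ^ (m - 1 - k) + 1) :=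
      (Int.even_mul_succ_self ((2 : Int) ^ (m - 1 - k))).two_dvd
    have hdiv1 : PySem.Int.floordiv
        ((2 : Int) ^ k * (2 : Int) ^ k * ((2 : Int) ^ (m - 1 - k)) * ((2 : Int) ^ (m - 1 - k) + 1)) 2
        = (2 : Int) ^ k * (2 : Int) ^ k * t := by
      rw [PySem.Int.floordiv_eq_ediv_of_pos (by norm_num)]
      have hrw : (2 : Int) ^ k * (2 : Int) ^ k * ((2 : Int) ^ (m - 1 - k)) * ((2 : Int) ^ (m - 1 - k) + 1)
          = 2 * ((2 : Int) ^ k * (2 : Int) ^ k * t) := by rw [mul_assoc, ht]; ring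
      rw [hrw, Int.mul_ediv_cancel_left _ (by norm_num)]
    have hpq : (2 : Int) ^ k * (2 : Int) ^ (m - 1 - k) = 2 ^ (m - 1) := by
      rw [← pow_add]
      have : k + (m - 1 - k) = m - 1 := by omega
      rw [this]
    have h3g : 3 * g3 k = (2 : Int) ^ k * (2 : Int) ^ k - 1 := by
      rw [g3_mul_three k, ← pow_add]
      have : (4 : Int) ^ k = 2 ^ (k + k) := by
        rw [show k + k = 2 * k by omega, pow_mul]
        norm_num
      rw [this]
    simp only [stepA, he, hdiv1, hdiv2]
    refine Prod.ext ?_ (Prod.ext rfl ?_)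
    · simp [pow_succ]
    · simp only [g3]
      rw [show (2 : Int) ^ (k + 1) = 2 ^ k * 2 from pow_succ 2 k, ← hpq]
      linear_combination ((2:Int) ^ k * 2 ^ k * 2 ^ k) * ht + ((2:Int) ^ k * 2 ^ (m - 1 - k)) * h3g

theorem s_closed (m : Nat) (hm : 1 ≤ m) :
    PySem.Int.floordiv ((2 : Int) ^ m * ((2 : Int) ^ m + 1)) 2 =
      2 ^ (m - 1) * (2 ^ m + 1) := by
  rw [PySem.Int.floordiv_eq_ediv_of_pos (by norm_num)]
  have h : (2 : Int) ^ m = 2 * 2 ^ (m - 1) := by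
    rw [← pow_succ']
    congr 1
    omega
  rw [show (2 : Int) ^ m * ((2 : Int) ^ m + 1) = 2 * (2 ^ (m - 1) * (2 ^ m + 1)) from by
    rw [h]; ring]
  rw [Int.mul_ediv_cancel_left _ (by norm_num)]

theorem fdiv3 (m : Nat) :
    PySem.Int.floordiv ((2 : Int) ^ (m - 1) * (4 ^ m - 1)) 3 = 2 ^ (m - 1) * g3 m := by
  rw [PySem.Int.floordiv_eq_ediv_of_pos (by norm_num)]
  have h : (2 : Int) ^ (m - 1) * (4 ^ m - 1) = 3 * (2 ^ (m - 1) * g3 m) := by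
    rw [← g3_mul_three m]; ring
  rw [h, Int.mul_ediv_cancel_left _ (by norm_num)]

-- ===== VERDICT (by name: the statement is the Claim_ definition above) =====
theorem G2_spec : Claim_equal_G2 := by
  intro n _
  unfold Spec_G2 G2 G2_alt
  by_cases hn : n ≤ 0
  · have : PySem.List.pyRange 0 n 1 = [] := by
      rw [PySem.List.pyRange_one]
      simp [Int.toNat_of_nonpos (by omega)]
    simp [this, hn]
  · simp only [if_neg (by omega : ¬ n ≤ 0)]
    set m : Nat := n.toNat with hm
    have hm1 : 1 ≤ m := by omega
    have hlen : (PySem.List.pyRange 0 n 1).length = m := by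
      rw [PySem.List.length_pyRange_one]; omega
    have hfold := foldl_const_iterate (stepA (PySem.Int.floordiv ((2:Int) ^ m * ((2:Int) ^ m + 1)) 2))
      (PySem.List.pyRange 0 n 1) ((1 : Int), (2 : Int) ^ (m - 1), (0 : Int))
    have hnm : (n - 1).toNat = m - 1 := by omega
    rw [hnm]
    simp only [stepA] at hfold
    rw [hfold, hlen, stepA_iterate m hm1 _ m le_rfl, fdiv3 m]
    have h4 : (4 : Int) ^ (m - 1) = 2 ^ (m - 1) * 2 ^ (m - 1) := by
      rw [← pow_add, ← two_mul]
      norm_num [pow_mul]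
    rw [s_closed m hm1, h4]
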